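-- pv_equiv track=rewrite | github.com/ppurple12/Summer2025 | agent_evaluation_nlp/backend/services/data/LoadingPipeline.py | parse_into_sections_from_blocks
-- ===== SOURCE A (Python) =====
-- def parse_into_sections_from_blocks(blocks):
--     sections, current_header, section_content = {}, None, []
--
--     # creates blocks to have headers and following content in order for K-V pairs
--     for block in blocks:
--         if block.startswith("[HEADER]"):
--             if current_header:
--                 sections[current_header] = "\n".join(section_content)
--             current_header = block.replace("[HEADER] ", "")
--             section_content = []
--         else:
--             section_content.append(block)
--
--     if current_header:
--         sections[current_header] = "\n".join(section_content)
--
--     return sections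
-- ===== SOURCE B (Python) =====
-- def parse_into_sections_from_blocks(blocks):
--     # Different decomposition: skip the pre-header prefix, then consume one
--     # whole section (header + its run of body blocks) per outer step, instead
--     # of a single stateful accumulator pass.
--     sections = {}
--     n = len(blocks)
--     i = 0
--     while i < n and not blocks[i].startswith("[HEADER]"):
--         i += 1
--     while i < n:
--         header = blocks[i].replace("[HEADER] ", "")
--         i += 1
--         body = []
--         while i < n and not blocks[i].startswith("[HEADER]"):
--             body.append(blocks[i])
--             i += 1
--         if header:
--             sections[header] = "\n".join(body)
--     return sections
-- ===== Notes on version B (the rewrite author's own statement) =====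
-- stated objective: alternative
-- what changed: Replaces A's single stateful pass carrying (sections, current_header, section_content) accumulators by a section-at-a-time scan: skip the pre-header prefix, then consume one header together with its run of body blocks per outer step and assign the joined slice directly.
import Mathlib
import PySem

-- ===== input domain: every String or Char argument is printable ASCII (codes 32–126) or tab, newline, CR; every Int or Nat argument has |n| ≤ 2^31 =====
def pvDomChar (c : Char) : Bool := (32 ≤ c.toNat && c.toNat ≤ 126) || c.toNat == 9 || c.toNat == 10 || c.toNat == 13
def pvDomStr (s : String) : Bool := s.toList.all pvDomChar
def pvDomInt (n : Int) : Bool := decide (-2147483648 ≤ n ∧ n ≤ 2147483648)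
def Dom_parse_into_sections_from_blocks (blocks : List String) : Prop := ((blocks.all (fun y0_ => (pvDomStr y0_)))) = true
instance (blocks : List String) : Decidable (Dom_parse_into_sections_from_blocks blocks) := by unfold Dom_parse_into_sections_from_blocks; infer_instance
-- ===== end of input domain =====

-- B replaces A's single stateful accumulator pass by a section-at-a-time scan
-- (skip the pre-header prefix, then consume one header plus its body run per
-- step); same cost, different decomposition (objective: alternative).

-- ===== PORT A =====
-- shared trivial predicate: block.startswith("[HEADER]")
def pvIsHeader (b : String) : Bool := PySem.Str.startswith b "[HEADER]"

-- 'if current_header: sections[current_header] = "\n".join(section_content)'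
def pvSave (d : PySem.Dict String String) (ch : Option String) (acc : List String) :
    PySem.Dict String String :=
  match ch with
  | none => d
  | some h => if h = "" then d else d.insert h (PySem.Str.join "\n" acc)

-- one iteration of A's for-loop over (sections, current_header, section_content)
def pvStepA (st : PySem.Dict String String × Option String × List String) (block : String) :
    PySem.Dict String String × Option String × List String :=
  if pvIsHeader block then
    (pvSave st.1 st.2.1 st.2.2, some (PySem.Str.replace block "[HEADER] " ""), [])
  else
    (st.1, st.2.1, st.2.2 ++ [block])

def parse_into_sections_from_blocks (blocks : List String) : List (String × String) :=
  let st := blocks.foldl pvStepA (PySem.Dict.empty, none, [])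
  (pvSave st.1 st.2.1 st.2.2).items

-- ===== PORT B =====
-- outer while-loop of Source B: consume one header and its run of body blocks per step
def pvGoB (d : PySem.Dict String String) : List String → PySem.Dict String String
  | [] => d
  | b :: t =>
    let header := PySem.Str.replace b "[HEADER] " ""
    let body := t.takeWhile (fun x => !pvIsHeader x)
    let rest := t.dropWhile (fun x => !pvIsHeader x)
    pvGoB (if header = "" then d else d.insert header (PySem.Str.join "\n" body)) rest
  termination_by l => l.length
  decreasing_by
    simp only [List.length_cons]
    exact Nat.lt_succ_of_le (List.length_dropWhile_le _ _)

def parse_into_sections_from_blocks_alt (blocks : List String) : List (String × String) :=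
  (pvGoB PySem.Dict.empty (blocks.dropWhile (fun x => !pvIsHeader x))).items

-- ===== PRECONDITION & SPEC =====
def Spec_parse_into_sections_from_blocks (blocks : List String) (out : List (String × String)) : Prop := out = parse_into_sections_from_blocks_alt blocks
instance (blocks : List String) (out : List (String × String)) : Decidable (Spec_parse_into_sections_from_blocks blocks out) := by unfold Spec_parse_into_sections_from_blocks; infer_instance

-- ===== CLAIM (what is proved, stated in full; the proofs are below) =====
def Claim_equal_parse_into_sections_from_blocks : Prop := ∀ (blocks : List String), Dom_parse_into_sections_from_blocks blocks → Spec_parse_into_sections_from_blocks blocks (parse_into_sections_from_blocks blocks)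

-- ===== LEMMAS AND PROOFS =====

theorem pvGoB_nil (d : PySem.Dict String String) : pvGoB d [] = d := by
  rw [pvGoB]

theorem pvGoB_cons (d : PySem.Dict String String) (b : String) (t : List String) :
    pvGoB d (b :: t) =
      pvGoB (if PySem.Str.replace b "[HEADER] " "" = "" then d
             else d.insert (PySem.Str.replace b "[HEADER] " "")
                    (PySem.Str.join "\n" (t.takeWhile (fun x => !pvIsHeader x))))
        (t.dropWhile (fun x => !pvIsHeader x)) := by
  rw [pvGoB]

-- invariant: finalizing A's loop state after processing l equals B's
-- section-at-a-time scan started from the finalized pending section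
theorem pv_main (l : List String) (d : PySem.Dict String String)
    (ch : Option String) (acc : List String) :
    (let st := l.foldl pvStepA (d, ch, acc); pvSave st.1 st.2.1 st.2.2)
      = pvGoB (pvSave d ch (acc ++ l.takeWhile (fun x => !pvIsHeader x)))
          (l.dropWhile (fun x => !pvIsHeader x)) := by
  induction l generalizing d ch acc with
  | nil => simp [pvGoB_nil]
  | cons b t ih =>
    by_cases h : pvIsHeader b = true
    · simp only [List.foldl_cons, pvStepA, h, if_true,
        List.takeWhile_cons, List.dropWhile_cons, Bool.not_eq_true', Bool.not_true,
        Bool.false_eq_true, if_false]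
      rw [ih]
      rw [pvGoB_cons]
      simp [pvSave]
    · simp only [List.foldl_cons, pvStepA, h, List.takeWhile_cons, List.dropWhile_cons,
        Bool.not_eq_true'] at *
      rw [ih]
      simp [List.append_assoc]

-- ===== VERDICT (by name: the statement is the Claim_ definition above) =====
theorem parse_into_sections_from_blocks_spec : Claim_equal_parse_into_sections_from_blocks := by
  intro blocks _
  unfold Spec_parse_into_sections_from_blocks parse_into_sections_from_blocks
    parse_into_sections_from_blocks_alt
  have h := pv_main blocks PySem.Dict.empty none []
  simp only [pvSave] at h
  exact congrArg PySem.Dict.items h
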